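-- pv_equiv track=rewrite | github.com/teqn99/coding-test-practice | SWEA/1005/베이비진_게임.py | check
-- ===== SOURCE A (Python) =====
-- def check(a):
--     run = 0
--     tri = 0
--
--     for i in range(len(a)):
--         if a.count(a[i]) >= 3:
--             tri += 1
--         if a.count(a[i]) >= 1 and a.count(a[i]+1) >= 1 and a.count(a[i]+2) >= 1:
--             run += 1
--
--     return run, tri
-- ===== SOURCE B (Python) =====
-- def check(a):
--     freq = {}
--     for x in a:
--         freq[x] = freq.get(x, 0) + 1
--
--     run = 0
--     tri = 0
--     for v, c in freq.items():
--         if c >= 3: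
--             tri += c
--         if v + 1 in freq and v + 2 in freq:
--             run += c
--
--     return run, tri
-- ===== Notes on version B (the rewrite author's own statement) =====
-- stated objective: faster
-- what changed: B builds a frequency table in one pass and then loops over the distinct values only, adding freq[v] to tri when freq[v] >= 3 and to run when v+1 and v+2 are keys, instead of A's per-index loop with repeated a.count scans.
import Mathlib
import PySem

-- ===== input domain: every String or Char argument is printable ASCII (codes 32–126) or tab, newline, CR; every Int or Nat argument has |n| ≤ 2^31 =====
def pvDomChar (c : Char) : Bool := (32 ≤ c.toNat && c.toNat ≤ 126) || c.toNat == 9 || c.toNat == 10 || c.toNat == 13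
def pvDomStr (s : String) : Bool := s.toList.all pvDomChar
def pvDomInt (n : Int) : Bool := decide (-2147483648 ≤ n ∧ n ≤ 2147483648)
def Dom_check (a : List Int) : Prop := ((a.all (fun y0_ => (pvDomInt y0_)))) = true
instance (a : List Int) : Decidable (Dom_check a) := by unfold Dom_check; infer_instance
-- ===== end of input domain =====

-- B replaces A's per-index loop with repeated list scans by a frequency table built once and
-- a loop over the distinct values with frequency-weighted accumulation (objective: faster).

-- ===== PORT A =====
def check (a : List Int) : Int × Int :=
  (PySem.List.pyRange 0 (PySem.List.len a) 1).foldl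
    (fun (rt : Int × Int) i =>
      -- a[i]: i is always in range here, so pyGetD is exact
      let rt1 := if PySem.List.count a (PySem.List.pyGetD a i 0) ≥ 3 then (rt.1, rt.2 + 1) else rt
      if PySem.List.count a (PySem.List.pyGetD a i 0) ≥ 1 ∧
         PySem.List.count a (PySem.List.pyGetD a i 0 + 1) ≥ 1 ∧
         PySem.List.count a (PySem.List.pyGetD a i 0 + 2) ≥ 1
      then (rt1.1 + 1, rt1.2) else rt1)
    (0, 0)

-- ===== PORT B =====
def check_alt (a : List Int) : Int × Int :=
  let freq : PySem.Dict Int Int := a.foldl (fun d x => d.insert x (d.getD x 0 + 1)) PySem.Dict.empty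
  freq.items.foldl
    (fun (rt : Int × Int) vc =>
      let rt1 := if vc.2 ≥ 3 then (rt.1, rt.2 + vc.2) else rt
      if freq.contains (vc.1 + 1) ∧ freq.contains (vc.1 + 2)
      then (rt1.1 + vc.2, rt1.2) else rt1)
    (0, 0)

-- ===== PRECONDITION & SPEC =====
def Spec_check (a : List Int) (out : Int × Int) : Prop := out = check_alt a
instance (a : List Int) (out : Int × Int) : Decidable (Spec_check a out) := by unfold Spec_check; infer_instance

-- ===== CLAIM (what is proved, stated in full; the proofs are below) =====
def Claim_equal_check : Prop := ∀ (a : List Int), Dom_check a → Spec_check a (check a)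

-- ===== LEMMAS AND PROOFS =====

-- A's pair fold: two independent conditional +1 accumulations.
theorem foldA_eq (l : List Int) (p q : Int → Prop) [DecidablePred p] [DecidablePred q]
    (init : Int × Int) :
    l.foldl (fun (rt : Int × Int) x =>
        let rt1 := if p x then (rt.1, rt.2 + 1) else rt
        if q x then (rt1.1 + 1, rt1.2) else rt1) init
      = (init.1 + (l.countP (fun x => decide (q x)) : Int),
         init.2 + (l.countP (fun x => decide (p x)) : Int)) := by
  induction l generalizing init with
  | nil => simp
  | cons x t ih =>
    simp only [List.foldl_cons, List.countP_cons, ih]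
    by_cases hp : p x <;> by_cases hq : q x <;> simp [hp, hq] <;> ring_nf
    all_goals try exact ⟨trivial, trivial⟩

-- B's pair fold over (value, weight) pairs: two conditional weighted accumulations.
theorem foldB_eq (l : List (Int × Int)) (p : Int × Int → Prop) (q : Int → Prop)
    [DecidablePred p] [DecidablePred q] (init : Int × Int) :
    l.foldl (fun (rt : Int × Int) vc =>
        let rt1 := if p vc then (rt.1, rt.2 + vc.2) else rt
        if q vc.1 then (rt1.1 + vc.2, rt1.2) else rt1) init
      = (init.1 + (l.map (fun vc => if q vc.1 then vc.2 else 0)).sum,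
         init.2 + (l.map (fun vc => if p vc then vc.2 else 0)).sum) := by
  induction l generalizing init with
  | nil => simp
  | cons x t ih =>
    simp only [List.foldl_cons, List.map_cons, List.sum_cons, ih]
    by_cases hp : p x <;> by_cases hq : q x.1 <;> simp [hp, hq] <;> ring_nf
    all_goals try exact ⟨trivial, trivial⟩

-- countP over a list = count-weighted sum over its distinct values, for a value-only predicate.
theorem countP_eq_dedup_sum (a : List Int) (p : Int → Bool) :
    ((a.countP p : Nat) : Int)
      = ((PySem.List.dedup a).map (fun v => if p v then (a.count v : Int) else 0)).sum := by
  have hperm : (PySem.List.dedup a).Perm a.dedup := by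
    apply (List.perm_ext_iff_of_nodup (PySem.List.nodup_dedup a) a.nodup_dedup).mpr
    intro x
    rw [PySem.List.mem_dedup, List.mem_dedup]
  have h := List.sum_map_count_dedup_filter_eq_countP p a
  calc ((a.countP p : Nat) : Int)
      = (((a.dedup.filter p).map fun x => a.count x).sum : Nat) := by rw [h]
    _ = ((a.dedup).map (fun v => if p v then (a.count v : Int) else 0)).sum := by
        induction a.dedup with
        | nil => simp
        | cons y t ih =>
          by_cases hy : p y <;> simp [hy, ← ih]
    _ = ((PySem.List.dedup a).map (fun v => if p v then (a.count v : Int) else 0)).sum := by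
        exact (List.Perm.sum_eq (hperm.map _)).symm

theorem check_eq_check_alt (a : List Int) : check a = check_alt a := by
  have hA : check a = a.foldl
      (fun (rt : Int × Int) x =>
        let rt1 := if PySem.List.count a x ≥ 3 then (rt.1, rt.2 + 1) else rt
        if PySem.List.count a x ≥ 1 ∧ PySem.List.count a (x + 1) ≥ 1 ∧ PySem.List.count a (x + 2) ≥ 1
        then (rt1.1 + 1, rt1.2) else rt1) (0, 0) := by
    unfold check
    exact PySem.List.foldl_pyRange_zero_pyGetD' a 0
      (fun (rt : Int × Int) x =>
        let rt1 := if PySem.List.count a x ≥ 3 then (rt.1, rt.2 + 1) else rt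
        if PySem.List.count a x ≥ 1 ∧ PySem.List.count a (x + 1) ≥ 1 ∧ PySem.List.count a (x + 2) ≥ 1
        then (rt1.1 + 1, rt1.2) else rt1) ((0, 0) : Int × Int)
  have hB : check_alt a = (PySem.Dict.counter a).items.foldl
      (fun (rt : Int × Int) vc =>
        let rt1 := if vc.2 ≥ 3 then (rt.1, rt.2 + vc.2) else rt
        if (PySem.Dict.counter a).contains (vc.1 + 1) ∧ (PySem.Dict.counter a).contains (vc.1 + 2)
        then (rt1.1 + vc.2, rt1.2) else rt1) (0, 0) := by
    unfold check_alt
    rfl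
  rw [hA, hB, foldA_eq,
    foldB_eq ((PySem.Dict.counter a).items) (fun vc => vc.2 ≥ 3)
      (fun v => (PySem.Dict.counter a).contains (v + 1) = true ∧
                (PySem.Dict.counter a).contains (v + 2) = true) ((0, 0) : Int × Int),
    PySem.Dict.items_counter, ← PySem.List.dedup_eq_ofList,
    List.map_map, List.map_map]
  simp only [Prod.mk.injEq, zero_add]
  constructor
  · -- run component
    rw [List.countP_congr (q := fun x => decide ((PySem.Dict.counter a).contains (x + 1) ∧
          (PySem.Dict.counter a).contains (x + 2)))
        (by intro x hx
            simp [PySem.Dict.contains_counter, PySem.List.count_eq,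
              List.one_le_count_iff, hx])]
    rw [countP_eq_dedup_sum a]
    refine congrArg List.sum (List.map_congr_left ?_)
    intro v hv
    simp [Function.comp]
  · -- tri component
    rw [countP_eq_dedup_sum a (fun x => decide ((PySem.List.count a x) ≥ 3))]
    refine congrArg List.sum (List.map_congr_left ?_)
    intro v hv
    simp [Function.comp, PySem.List.count_eq]

-- ===== VERDICT (by name: the statement is the Claim_ definition above) =====
theorem check_spec : Claim_equal_check := by
  intro a _
  unfold Spec_check
  exact check_eq_check_alt a
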